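-- pv_equiv track=rewrite | github.com/TUDBS-Clickbait/team-1-task-1 | statistical-model-multi-classification/multipart_detection.py | contains_explicit_enumeration
-- ===== SOURCE A (Python) =====
-- def get_number_from_string(inputString):
--     for char in inputString:
--         return int(char) if char.isdigit() else 0
--
-- def has_number(inputString):
--     return any(char.isdigit() for char in inputString)
--
-- def contains_explicit_enumeration(targetParagraphs):
--     predIsSmallerCounter = 0;
--     lastNumber = 0;
--     for targetParagraph in targetParagraphs:
--         firstCharsOfParagraph = targetParagraph[0:2]
--         number_exists = has_number(firstCharsOfParagraph)
--         if number_exists: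
--             currentNumber = get_number_from_string(firstCharsOfParagraph)
--             if lastNumber < currentNumber: predIsSmallerCounter = predIsSmallerCounter + 1;
--             lastNumber = currentNumber;
--     return True if predIsSmallerCounter >= 2 else False
-- ===== SOURCE B (Python) =====
-- def contains_explicit_enumeration(targetParagraphs):
--     # Search for the NEXT rise: consume the iterator until a qualifying
--     # paragraph's leading number exceeds `last`; report (found, new_last).
--     def next_rise(it, last):
--         for p in it:
--             head = p[0:2]
--             if any(c.isdigit() for c in head):
--                 n = int(head[0]) if head[0].isdigit() else 0
--                 if last < n:
--                     return True, n
--                 last = n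
--         return False, last
--
--     it = iter(targetParagraphs)
--     found, last = next_rise(it, 0)       # first rise?
--     if not found:
--         return False
--     found, _ = next_rise(it, last)       # second rise (shared iterator)?
--     return found
-- ===== Notes on version B (the rewrite author's own statement) =====
-- stated objective: alternative
-- what changed: Replaces A's count-all-rises pass that tallies a counter over the whole list with an early-exiting two-stage search: a helper that consumes a shared iterator until the next rise is found, called twice, returning as soon as (or whether) a second rise exists; no counter is maintained.
import Mathlib
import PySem

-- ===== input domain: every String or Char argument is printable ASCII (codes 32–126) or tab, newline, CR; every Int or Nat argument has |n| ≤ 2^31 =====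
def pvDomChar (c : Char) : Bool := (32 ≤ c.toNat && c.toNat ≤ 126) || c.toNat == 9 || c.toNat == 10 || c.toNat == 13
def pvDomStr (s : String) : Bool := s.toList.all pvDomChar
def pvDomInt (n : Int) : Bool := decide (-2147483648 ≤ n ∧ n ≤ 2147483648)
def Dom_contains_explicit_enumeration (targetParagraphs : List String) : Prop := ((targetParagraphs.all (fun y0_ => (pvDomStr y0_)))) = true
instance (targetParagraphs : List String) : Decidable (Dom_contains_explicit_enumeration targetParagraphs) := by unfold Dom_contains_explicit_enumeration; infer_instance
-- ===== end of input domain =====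

-- B replaces A's count-all loop with an early-exiting two-stage search for the first
-- and then the second rise (objective: alternative control structure; same cost).


-- ===== PORT A =====
-- get_number_from_string: the Python for-loop returns on its FIRST iteration, so only the
-- first char matters; the [] case (Python: returns None) is unreachable here because the
-- caller checks has_number first.  int(c) on a digit char is exactly c.toNat - 48.
def pvGetNumberFromString (cs : List Char) : Int :=
  match cs with
  | [] => 0
  | c :: _ => if PySem.Chars.isdigit c then (c.toNat : Int) - 48 else 0

def pvHasNumber (cs : List Char) : Bool := cs.any PySem.Chars.isdigit

-- the body of A's for-loop over (predIsSmallerCounter, lastNumber); firstCharsOfParagraph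
-- (= targetParagraph[0:2]) is written inline
def pvStepA (st : Int × Int) (targetParagraph : String) : Int × Int :=
  if pvHasNumber (PySem.List.slice targetParagraph.toList (some 0) (some 2)) then
    (if st.2 < pvGetNumberFromString (PySem.List.slice targetParagraph.toList (some 0) (some 2))
       then st.1 + 1 else st.1,
     pvGetNumberFromString (PySem.List.slice targetParagraph.toList (some 0) (some 2)))
  else st

def contains_explicit_enumeration (targetParagraphs : List String) : Bool :=
  let st := targetParagraphs.foldl pvStepA (0, 0)
  if st.1 ≥ 2 then true else false

-- ===== PORT B =====
-- int(head[0]) if head[0].isdigit() else 0 (head nonempty whenever it is reached)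
def pvLeadNum (head : List Char) : Int :=
  match head with
  | [] => 0
  | c :: _ => if PySem.Chars.isdigit c then (c.toNat : Int) - 48 else 0

-- B's helper next_rise: consume the (remaining) paragraphs until a qualifying leading
-- number exceeds `last`; return (found, new last, unconsumed rest) — the rest models the
-- shared Python iterator.
def pvNextRise : List String → Int → Bool × Int × List String
  | [], last => (false, last, [])
  | p :: rest, last =>
    if (PySem.List.slice p.toList (some 0) (some 2)).any PySem.Chars.isdigit then
      if last < pvLeadNum (PySem.List.slice p.toList (some 0) (some 2)) then
        (true, pvLeadNum (PySem.List.slice p.toList (some 0) (some 2)), rest)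
      else pvNextRise rest (pvLeadNum (PySem.List.slice p.toList (some 0) (some 2)))
    else pvNextRise rest last

def contains_explicit_enumeration_alt (targetParagraphs : List String) : Bool :=
  let s1 := pvNextRise targetParagraphs 0
  if s1.1 then (pvNextRise s1.2.2 s1.2.1).1 else false

-- ===== PRECONDITION & SPEC =====
def Spec_contains_explicit_enumeration (targetParagraphs : List String) (out : Bool) : Prop := out = contains_explicit_enumeration_alt targetParagraphs
instance (targetParagraphs : List String) (out : Bool) : Decidable (Spec_contains_explicit_enumeration targetParagraphs out) := by unfold Spec_contains_explicit_enumeration; infer_instance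

-- ===== CLAIM (what is proved, stated in full; the proofs are below) =====
def Claim_equal_contains_explicit_enumeration : Prop := ∀ (targetParagraphs : List String), Dom_contains_explicit_enumeration targetParagraphs → Spec_contains_explicit_enumeration targetParagraphs (contains_explicit_enumeration targetParagraphs)

-- ===== LEMMAS AND PROOFS =====

lemma leadNum_eq (cs : List Char) : pvLeadNum cs = pvGetNumberFromString cs := by
  cases cs <;> rfl

-- the two possible values of A's loop body
lemma stepA_digit (st : Int × Int) (p : String)
    (hd : (PySem.List.slice p.toList (some 0) (some 2)).any PySem.Chars.isdigit = true) :
    pvStepA st p =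
      (if st.2 < pvLeadNum (PySem.List.slice p.toList (some 0) (some 2)) then st.1 + 1 else st.1,
       pvLeadNum (PySem.List.slice p.toList (some 0) (some 2))) := by
  unfold pvStepA
  rw [leadNum_eq]
  exact if_pos hd

lemma stepA_nodigit (st : Int × Int) (p : String)
    (hd : ¬ (PySem.List.slice p.toList (some 0) (some 2)).any PySem.Chars.isdigit = true) :
    pvStepA st p = st := by
  unfold pvStepA
  exact if_neg hd

-- if next_rise finds no rise, A's counter is unchanged over that segment
lemma nr_false (ps : List String) : ∀ (last l : Int) (r : List String),
    pvNextRise ps last = (false, l, r) → ∀ cnt, (ps.foldl pvStepA (cnt, last)).1 = cnt := by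
  induction ps with
  | nil => intro last l r _ cnt; rfl
  | cons p rest ih =>
    intro last l r h cnt
    unfold pvNextRise at h
    rw [List.foldl_cons]
    by_cases hd : (PySem.List.slice p.toList (some 0) (some 2)).any PySem.Chars.isdigit = true
    · rw [if_pos hd] at h
      rw [stepA_digit _ _ hd]
      by_cases hr : last < pvLeadNum (PySem.List.slice p.toList (some 0) (some 2))
      · rw [if_pos hr] at h; exact absurd (congrArg (fun x => x.1) h) (by simp)
      · rw [if_neg hr] at h
        rw [if_neg hr]
        exact ih _ l r h cnt
    · rw [if_neg hd] at h
      rw [stepA_nodigit _ _ hd]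
      exact ih last l r h cnt

-- if next_rise finds a rise, A's fold over ps equals the fold over the rest with the
-- counter bumped and lastNumber updated
lemma nr_true (ps : List String) : ∀ (last n : Int) (r : List String),
    pvNextRise ps last = (true, n, r) →
    ∀ cnt, ps.foldl pvStepA (cnt, last) = r.foldl pvStepA (cnt + 1, n) := by
  induction ps with
  | nil => intro last n r h; exact absurd (congrArg (fun x => x.1) h) (by simp [pvNextRise])
  | cons p rest ih =>
    intro last n r h cnt
    unfold pvNextRise at h
    rw [List.foldl_cons]
    by_cases hd : (PySem.List.slice p.toList (some 0) (some 2)).any PySem.Chars.isdigit = true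
    · rw [if_pos hd] at h
      rw [stepA_digit _ _ hd]
      by_cases hr : last < pvLeadNum (PySem.List.slice p.toList (some 0) (some 2))
      · rw [if_pos hr] at h
        have hn : pvLeadNum (PySem.List.slice p.toList (some 0) (some 2)) = n :=
          congrArg (fun x => x.2.1) h
        have hrr : rest = r := congrArg (fun x => x.2.2) h
        rw [if_pos hr, hn, hrr]
      · rw [if_neg hr] at h
        rw [if_neg hr]
        exact ih _ n r h cnt
    · rw [if_neg hd] at h
      rw [stepA_nodigit _ _ hd]
      exact ih last n r h cnt

-- A's counter never decreases
lemma cnt_mono (ps : List String) : ∀ (cnt last : Int),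
    cnt ≤ (ps.foldl pvStepA (cnt, last)).1 := by
  induction ps with
  | nil => intro cnt last; exact le_refl _
  | cons p rest ih =>
    intro cnt last
    rw [List.foldl_cons]
    by_cases hd : (PySem.List.slice p.toList (some 0) (some 2)).any PySem.Chars.isdigit = true
    · rw [stepA_digit _ _ hd]
      by_cases hr : (cnt, last).2 < pvLeadNum (PySem.List.slice p.toList (some 0) (some 2))
      · rw [if_pos hr]
        calc cnt ≤ cnt + 1 := by omega
          _ ≤ _ := ih (cnt + 1) _
      · rw [if_neg hr]
        exact ih cnt _
    · rw [stepA_nodigit _ _ hd]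
      exact ih cnt last

-- ===== VERDICT (by name: the statement is the Claim_ definition above) =====
theorem contains_explicit_enumeration_spec : Claim_equal_contains_explicit_enumeration := by
  intro ps _
  unfold Spec_contains_explicit_enumeration contains_explicit_enumeration
    contains_explicit_enumeration_alt
  simp only []
  rcases h1 : pvNextRise ps 0 with ⟨f1, l1, r1⟩
  cases f1
  · have hF := nr_false ps 0 l1 r1 h1 0
    simp [hF]
  · have hT := nr_true ps 0 l1 r1 h1 0
    norm_num at hT
    rw [hT]
    simp only [if_true]
    rcases h2 : pvNextRise r1 l1 with ⟨f2, l2, r2⟩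
    cases f2
    · have hF := nr_false r1 l1 l2 r2 h2 1
      simp [hF]
    · have hT2 := nr_true r1 l1 l2 r2 h2 1
      norm_num at hT2
      rw [hT2]
      have := cnt_mono r2 2 l2
      simp only []
      rw [if_pos (by omega)]
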